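-- pv_equiv track=rewrite | github.com/Waqar-5/Python_Code_learning_Practice_Classes_Code | Day5_Class9&10/sets/projects/project.py | find_common_skills
-- ===== SOURCE A (Python) =====
-- def clean_skills(skills_list):
--     """Remove duplicates using set"""
--     return set(skills_list)
--
-- def find_common_skills(data):
--     """Find intersection of skills"""
--     all_sets = [clean_skills(skills) for _, skills in data]
--     if all_sets:
--         common = all_sets[0]
--         for skill_set in all_sets[1:]:
--             common &= skill_set
--         return common
--     return set()
-- ===== SOURCE B (Python) =====
-- def find_common_skills(data):
--     """Find intersection of skills via a single tally pass: count, for each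
--     distinct skill, how many entries contain it; the common skills are those
--     whose count equals the number of entries."""
--     counts = {}
--     for _, skills in data:
--         for skill in set(skills):
--             counts[skill] = counts.get(skill, 0) + 1
--     n = len(data)
--     return {skill for skill, c in counts.items() if c == n}
-- ===== Notes on version B (the rewrite author's own statement) =====
-- stated objective: alternative
-- what changed: Replaces the repeated pairwise set-intersection loop seeded from the first entry's set by a single tally pass that counts in how many entries each distinct skill occurs and keeps the skills whose count equals len(data), so the empty case falls out naturally.
import Mathlib
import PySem

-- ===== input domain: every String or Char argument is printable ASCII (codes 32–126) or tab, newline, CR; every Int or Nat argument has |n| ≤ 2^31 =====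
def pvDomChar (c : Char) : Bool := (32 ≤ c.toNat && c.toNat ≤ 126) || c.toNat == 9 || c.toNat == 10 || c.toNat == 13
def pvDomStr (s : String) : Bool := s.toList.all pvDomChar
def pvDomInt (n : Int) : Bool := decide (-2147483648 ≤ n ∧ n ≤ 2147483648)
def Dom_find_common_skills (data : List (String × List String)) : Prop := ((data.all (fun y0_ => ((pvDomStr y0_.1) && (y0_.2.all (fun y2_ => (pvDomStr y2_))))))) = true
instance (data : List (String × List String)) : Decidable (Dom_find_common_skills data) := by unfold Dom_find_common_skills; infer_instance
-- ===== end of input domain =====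

-- ===== PORT A =====
-- set(skills_list) per entry; then left fold of '&' starting from the first set; set() when empty
def find_common_skills (data : List (String × List String)) : List String :=
  let all_sets : List (PySem.Set String) := data.map (fun p => PySem.Set.ofList p.2)
  match all_sets with
  | [] => PySem.Set.empty
  | first :: rest => rest.foldl (fun common skill_set => PySem.Set.inter common skill_set) first

-- ===== PORT B =====
-- B: one tally pass over the per-entry sets, then keep the skills counted len(data) times
def find_common_skills_alt (data : List (String × List String)) : List String :=
  let counts : PySem.Dict String Int :=
    data.foldl (fun d p =>
      (PySem.Set.ofList p.2).foldl (fun d skill => d.modify skill 0 (· + 1)) d) PySem.Dict.empty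
  ((counts.items.filter (fun q => q.2 == (data.length : Int))).map (·.1))

-- ===== PRECONDITION & SPEC =====
def Spec_find_common_skills (data : List (String × List String)) (out : List String) : Prop := out = find_common_skills_alt data
instance (data : List (String × List String)) (out : List String) : Decidable (Spec_find_common_skills data out) := by unfold Spec_find_common_skills; infer_instance

-- ===== CLAIM (what is proved, stated in full; the proofs are below) =====
def Claim_equal_find_common_skills : Prop := ∀ (data : List (String × List String)), Dom_find_common_skills data → Spec_find_common_skills data (find_common_skills data)

-- ===== LEMMAS AND PROOFS =====

-- A's intersection loop filters the seed set by membership in every remaining set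
theorem foldl_inter_eq_filter (rest : List (PySem.Set String)) (s : List String) :
    rest.foldl (fun common skill_set => PySem.Set.inter common skill_set) s
      = s.filter (fun x => rest.all (fun t => t.contains x)) := by
  induction rest generalizing s with
  | nil => simp
  | cons t rest ih =>
      rw [List.foldl_cons, ih]
      simp only [PySem.Set.inter, List.filter_filter, List.all_cons]
      exact List.filter_congr (fun a _ => Bool.and_comm _ _)

-- the tally dict's lookup counts the per-entry sets containing a skill
theorem getD_tally (data : List (String × List String)) (d : PySem.Dict String Int) (x : String) :
    (data.foldl (fun d p => (PySem.Set.ofList p.2).foldl (fun d skill => d.modify skill 0 (· + 1)) d) d).getD x 0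
      = d.getD x 0 + ((data.map (fun p => PySem.Set.ofList p.2)).countP (fun t => t.contains x) : Int) := by
  induction data generalizing d with
  | nil => simp
  | cons p rest ih =>
      rw [List.foldl_cons, ih, PySem.Dict.getD_foldl_modify_add_one, List.map_cons,
        List.countP_cons]
      by_cases hx : x ∈ PySem.Set.ofList p.2
      · rw [List.count_eq_one_of_mem (PySem.Set.nodup_ofList p.2) hx]
        have hc : (PySem.Set.ofList p.2).contains x = true := (PySem.Set.contains_iff _ _).mpr hx
        simp only [hc, if_true]
        push_cast; ring
      · rw [List.count_eq_zero_of_not_mem hx]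
        have hc : (PySem.Set.ofList p.2).contains x = false := by
          simp [hx]
        simp only [hc, if_false, Bool.false_eq_true]
        push_cast; ring

-- the tally dict's keys are the union (in first-insertion order) of the per-entry sets
theorem keys_tally (data : List (String × List String)) (d : PySem.Dict String Int) :
    (data.foldl (fun d p => (PySem.Set.ofList p.2).foldl (fun d skill => d.modify skill 0 (· + 1)) d) d).keys
      = PySem.Set.update d.keys ((data.map (fun p => PySem.Set.ofList p.2)).flatten) := by
  induction data generalizing d with
  | nil => simp [PySem.Set.update]
  | cons p rest ih =>
      simp only [List.foldl_cons, ih, PySem.Dict.keys_foldl_modify, List.map_cons,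
        List.flatten_cons, PySem.Set.update, List.foldl_append]

-- extending a set only appends fresh elements, so a filter landing inside the base is unchanged
theorem filter_update (l : List String) (s : List String) (P : String → Bool)
    (h : ∀ x, P x = true → x ∈ s) :
    (PySem.Set.update s l).filter P = s.filter P := by
  induction l generalizing s with
  | nil => rfl
  | cons x l ih =>
      have hstep : (PySem.Set.update s (x :: l)) = PySem.Set.update (PySem.Set.add s x) l := rfl
      rw [hstep, ih (PySem.Set.add s x)
        (fun y hy => (PySem.Set.mem_add _ _ _).mpr (Or.inl (h y hy)))]
      rw [PySem.Set.add_eq_ite]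
      by_cases hx : x ∈ s
      · simp [hx]
      · have hPx : P x = false := by
          cases hP : P x with
          | true => exact absurd (h x hP) hx
          | false => rfl
        simp [hx, List.filter_append, hPx]

-- ===== VERDICT (by name: the statement is the Claim_ definition above) =====
theorem find_common_skills_spec : Claim_equal_find_common_skills := by
  unfold Claim_equal_find_common_skills
  intro data _
  unfold Spec_find_common_skills
  cases data with
  | nil => rfl
  | cons p ds =>
      unfold find_common_skills find_common_skills_alt
      simp only [List.map_cons]
      set s0 : PySem.Set String := PySem.Set.ofList p.2 with hs0
      set restsets : List (PySem.Set String) := ds.map (fun p => PySem.Set.ofList p.2) with hrs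
      set counts : PySem.Dict String Int :=
        ((p :: ds).foldl (fun d p =>
          (PySem.Set.ofList p.2).foldl (fun d skill => d.modify skill 0 (· + 1)) d)
          PySem.Dict.empty) with hcounts
      have hkeys : counts.keys = PySem.Set.update s0 restsets.flatten := by
        rw [hcounts, keys_tally]
        simp only [List.map_cons, List.flatten_cons]
        show PySem.Set.update PySem.Dict.empty.keys (s0 ++ restsets.flatten) = _
        rw [show PySem.Dict.empty.keys = ([] : List String) from rfl]
        simp only [PySem.Set.update, List.foldl_append]
        rw [show (List.foldl PySem.Set.add [] s0 : List String) = PySem.Set.ofList s0 from rfl,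
          PySem.Set.ofList_eq_self_of_nodup s0 (PySem.Set.nodup_ofList p.2)]
      have hnodup : counts.keys.Nodup := by
        rw [hkeys]
        exact PySem.Set.nodup_update _ _ (PySem.Set.nodup_ofList p.2)
      have hget : ∀ x, counts.getD x 0
          = ((s0 :: restsets).countP (fun t => t.contains x) : Int) := by
        intro x
        have h0 : counts.getD x 0 = PySem.Dict.empty.getD x (0 : Int)
            + (((p :: ds).map (fun p => PySem.Set.ofList p.2)).countP
                (fun t => t.contains x) : Int) := by
          rw [hcounts, getD_tally]
        rw [h0, show PySem.Dict.empty.getD x (0 : Int) = 0 from rfl, zero_add]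
        simp only [List.map_cons, ← hs0, ← hrs]
      rw [PySem.Dict.items_eq_map_keys counts hnodup 0, List.filter_map, List.map_map]
      simp only [Function.comp_def]
      rw [show (List.map (fun x : String => x) = fun l : List String => l) from funext List.map_id']
      rw [hkeys, filter_update _ s0 _ ?side]
      case side =>
        intro x hx
        rw [beq_iff_eq, hget x] at hx
        by_contra hmem
        have hc0 : s0.contains x = false := by simp [hmem]
        have hle : (s0 :: restsets).countP (fun t => t.contains x) ≤ restsets.length := by
          simp only [List.countP_cons, hc0, if_false, Bool.false_eq_true, Nat.add_zero]
          exact List.countP_le_length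
        have hlen : restsets.length = ds.length := by simp [hrs]
        rw [hlen] at hle
        simp only [List.length_cons] at hx
        push_cast at hx
        omega
      rw [foldl_inter_eq_filter]
      apply List.filter_congr
      intro x hxs
      have hc1 : s0.contains x = true := (PySem.Set.contains_iff _ _).mpr hxs
      have hget' : counts.getD x 0 = 1 + (restsets.countP (fun t => t.contains x) : Int) := by
        rw [hget x]
        simp only [List.countP_cons, hc1, if_true]
        push_cast; ring
      have hlen : restsets.length = ds.length := by simp [hrs]
      by_cases hall : restsets.all (fun t => t.contains x) = true
      · have hcp : restsets.countP (fun t => t.contains x) = restsets.length :=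
          List.countP_eq_length.mpr (by simpa [List.all_eq_true] using hall)
        rw [hall]
        symm
        rw [beq_iff_eq, hget', hcp, hlen]
        simp only [List.length_cons]
        push_cast; ring
      · have hne : restsets.countP (fun t => t.contains x) ≠ restsets.length := by
          intro h
          exact hall (List.all_eq_true.mpr (fun t ht => List.countP_eq_length.mp h t ht))
        have hle := List.countP_le_length (p := fun t => t.contains x) (l := restsets)
        have hallf : restsets.all (fun t => t.contains x) = false := by
          simpa using hall
        rw [hallf]
        symm
        rw [beq_eq_false_iff_ne, hget']
        rw [hlen] at hne hle
        simp only [List.length_cons]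
        push_cast
        omega
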